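-- pv_equiv track=rewrite | github.com/Grasselli-Geomechanics-Group/Log_Digitizer | image.py | group_runs
-- ===== SOURCE A (Python) =====
-- def group_runs(li, tolerance=1):
--     out = []
--     last = li[0]
--     for x in li:
--         if x-last > tolerance:
--             yield out
--             out = []
--         out.append(x)
--         last = x
--     yield out
-- ===== SOURCE B (Python) =====
-- def group_runs(li, tolerance=1):
--     # Two staged passes: first compute the split indices, then yield slices
--     # between consecutive split points (no running accumulator, no 'last').
--     n = len(li)
--     cuts = [i for i in range(1, n) if li[i] - li[i - 1] > tolerance]
--     start = 0
--     for b in cuts: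
--         yield li[start:b]
--         start = b
--     yield li[start:]
-- ===== Notes on version B (the rewrite author's own statement) =====
-- stated objective: alternative
-- what changed: B replaces A's single accumulate-and-reset generator loop by two staged passes: first a comprehension over indices collects the split positions where li[i]-li[i-1] > tolerance, then a second walk over those boundary indices yields the slices li[start:b] between consecutive split points (no running accumulator, no 'last' variable).
-- intended difference: When tolerance is negative (and li nonempty), A's comparison of the first element with its own initial 'last' fires and A yields a spurious empty first group before the partition, while B yields just the partition with no empty group, which is the intended grouping. — e.g. on group_runs([0], -1): A returns [[], [0]], B returns [[0]]
import Mathlib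
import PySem

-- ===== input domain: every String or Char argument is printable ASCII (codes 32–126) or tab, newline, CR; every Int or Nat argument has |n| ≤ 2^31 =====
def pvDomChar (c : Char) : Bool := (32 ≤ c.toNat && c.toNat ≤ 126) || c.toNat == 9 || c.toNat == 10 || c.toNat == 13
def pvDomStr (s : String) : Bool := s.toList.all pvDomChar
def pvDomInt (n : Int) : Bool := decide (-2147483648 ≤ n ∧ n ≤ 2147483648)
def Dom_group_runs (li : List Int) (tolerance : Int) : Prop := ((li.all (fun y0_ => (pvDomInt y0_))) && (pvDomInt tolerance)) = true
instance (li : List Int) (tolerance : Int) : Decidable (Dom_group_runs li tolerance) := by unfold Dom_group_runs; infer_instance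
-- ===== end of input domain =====

-- B computes the grouping in two staged passes — first the list of split indices, then the
-- slices between consecutive split points — instead of A's accumulate-and-reset generator loop
-- (objective: alternative decomposition).

-- ===== PORT A =====
-- loop body of A's 'for x in li' (state: yielded groups so far, current 'out', 'last')
def stepA (tolerance : Int) (st : List (List Int) × List Int × Int) (x : Int) :
    List (List Int) × List Int × Int :=
  if x - st.2.2 > tolerance then (st.1 ++ [st.2.1], [x], x)
  else (st.1, st.2.1 ++ [x], x)

def group_runs (li : List Int) (tolerance : Int) : List (List Int) :=
  match PySem.List.pyGet? li 0 with    -- 'last = li[0]'; none = IndexError (outside Pre_)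
  | none => []
  | some l0 =>
    let s := li.foldl (stepA tolerance) ([], [], l0)
    s.1 ++ [s.2.1]

-- ===== PORT B =====
-- 'cuts = [i for i in range(1, n) if li[i] - li[i-1] > tolerance]'
-- (the indices i are always in range, so pyGetD with any default is exact for li[i])
def cutsOf (li : List Int) (tolerance : Int) : List Int :=
  (PySem.List.pyRange 1 (li.length : Int) 1).filter
    (fun i => decide (PySem.List.pyGetD li i 0 - PySem.List.pyGetD li (i - 1) 0 > tolerance))

-- loop body of B's 'for b in cuts' (state: slices yielded so far, 'start')
def stepB (li : List Int) (st : List (List Int) × Int) (b : Int) : List (List Int) × Int :=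
  (st.1 ++ [PySem.List.slice li (some st.2) (some b)], b)

def group_runs_alt (li : List Int) (tolerance : Int) : List (List Int) :=
  let s := (cutsOf li tolerance).foldl (stepB li) ([], 0)
  s.1 ++ [PySem.List.slice li (some s.2) none]   -- final 'yield li[start:]'

-- ===== PRECONDITION & SPEC =====
-- A raises IndexError on the empty list ('last = li[0]'): exactly that input is excluded.
def Pre_group_runs (li : List Int) (tolerance : Int) : Prop := li ≠ []
instance (li : List Int) (tolerance : Int) : Decidable (Pre_group_runs li tolerance) := by
  unfold Pre_group_runs; infer_instance
def pvWitness_group_runs : List Int × Int := ([0, 1, 5, 6], 1)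

-- When tolerance < 0 (and li nonempty), A's comparison of the first element with its own initial
-- 'last' fires, so A yields a spurious empty first group before the partition; B yields just the
-- partition with no empty group, which is the intended grouping.
def D_group_runs (li : List Int) (tolerance : Int) : Prop := tolerance < 0
instance (li : List Int) (tolerance : Int) : Decidable (D_group_runs li tolerance) := by
  unfold D_group_runs; infer_instance

def Spec_group_runs (li : List Int) (tolerance : Int) (out : List (List Int)) : Prop :=
  ¬ D_group_runs li tolerance → out = group_runs_alt li tolerance
instance (li : List Int) (tolerance : Int) (out : List (List Int)) :
    Decidable (Spec_group_runs li tolerance out) := by unfold Spec_group_runs; infer_instance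

def pvDiffWitness_group_runs : List Int × Int := ([0], -1)
def pvDiffWitnessOut_group_runs : (List (List Int)) × (List (List Int)) := ([[], [0]], [[0]])

-- ===== CLAIM (what is proved, stated in full; the proofs are below) =====
def Claim_unchanged_group_runs : Prop := ∀ (li : List Int) (tolerance : Int),
  Dom_group_runs li tolerance → Pre_group_runs li tolerance →
  Spec_group_runs li tolerance (group_runs li tolerance)
def Claim_changed_group_runs : Prop :=
  Dom_group_runs (pvDiffWitness_group_runs.1) (pvDiffWitness_group_runs.2) ∧
  Pre_group_runs (pvDiffWitness_group_runs.1) (pvDiffWitness_group_runs.2) ∧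
  D_group_runs (pvDiffWitness_group_runs.1) (pvDiffWitness_group_runs.2) ∧
  group_runs (pvDiffWitness_group_runs.1) (pvDiffWitness_group_runs.2) = pvDiffWitnessOut_group_runs.1 ∧
  group_runs_alt (pvDiffWitness_group_runs.1) (pvDiffWitness_group_runs.2) = pvDiffWitnessOut_group_runs.2 ∧
  pvDiffWitnessOut_group_runs.1 ≠ pvDiffWitnessOut_group_runs.2
def Claim_exact_group_runs : Prop := ∀ (li : List Int) (tolerance : Int),
  Dom_group_runs li tolerance → Pre_group_runs li tolerance → D_group_runs li tolerance →
  group_runs li tolerance ≠ group_runs_alt li tolerance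

-- ===== LEMMAS AND PROOFS =====

-- the common partition both programs compute (split where the gap to the previous element > tol)
def chunks (tol : Int) : Int → List Int → List (List Int)
  | x, [] => [[x]]
  | x, y :: r =>
    if y - x > tol then [x] :: chunks tol y r
    else match chunks tol y r with
         | [] => [[x]]
         | g :: gs => (x :: g) :: gs

def mapHead (f : List Int → List Int) : List (List Int) → List (List Int)
  | [] => []
  | c :: cs => f c :: cs

theorem mapHead_id (l : List (List Int)) : mapHead (fun t => t) l = l := by
  cases l <;> simp [mapHead]

theorem chunks_ne_nil (tol x : Int) (r : List Int) : chunks tol x r ≠ [] := by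
  cases r with
  | nil => simp [chunks]
  | cons y r' =>
    simp only [chunks]
    split
    · simp
    · split <;> simp

-- ---- A-side: fold = remaining-output function = chunks (with a spurious [] iff tol < 0) ----

-- A's remaining output from state (out, last) over the rest of the list
def gA (tol : Int) : List Int → Int → List Int → List (List Int)
  | out, _, [] => [out]
  | out, last, y :: r =>
    if y - last > tol then out :: gA tol [y] y r else gA tol (out ++ [y]) y r

theorem foldA_eq_gA (tol : Int) (l : List Int) :
    ∀ (res : List (List Int)) (out : List Int) (last : Int),
      (l.foldl (stepA tol) (res, out, last)).1 ++ [(l.foldl (stepA tol) (res, out, last)).2.1]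
        = res ++ gA tol out last l := by
  induction l with
  | nil => intro res out last; simp [gA]
  | cons y r ih =>
    intro res out last
    by_cases h : y - last > tol <;> simp [stepA, gA, h, ih]

theorem gA_eq_chunks (tol : Int) (r : List Int) :
    ∀ (x : Int) (o : List Int), gA tol (o ++ [x]) x r = mapHead (fun t => o ++ t) (chunks tol x r) := by
  induction r with
  | nil => intro x o; simp [gA, chunks, mapHead]
  | cons y r' ih =>
    intro x o
    by_cases h : y - x > tol
    · have h1 := ih y ([] : List Int)
      simp only [List.nil_append] at h1
      rw [mapHead_id] at h1
      simp only [gA, chunks]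
      rw [if_pos h, if_pos h, h1]
      simp [mapHead]
    · have h1 := ih y (o ++ [x])
      simp only [gA, chunks]
      rw [if_neg h, if_neg h, h1]
      cases hc : chunks tol y r' with
      | nil => exact absurd hc (chunks_ne_nil tol y r')
      | cons c cs => simp [mapHead, List.append_assoc]

-- A on a nonempty list: chunks, with a spurious leading [] iff tol < 0
theorem group_runs_cons (tol x : Int) (r : List Int) :
    group_runs (x :: r) tol =
      (if 0 > tol then [[]] else []) ++ chunks tol x r := by
  have hg : gA tol ([] ++ [x]) x r = mapHead (fun t => [] ++ t) (chunks tol x r) :=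
    gA_eq_chunks tol r x []
  simp only [List.nil_append] at hg
  rw [mapHead_id] at hg
  by_cases h : (0 : Int) > tol
  · simp [group_runs, PySem.List.pyGet?, PySem.List.pyIdx?, List.foldl_cons, stepA,
      foldA_eq_gA, hg, h]
  · simp [group_runs, PySem.List.pyGet?, PySem.List.pyIdx?, List.foldl_cons, stepA,
      foldA_eq_gA, hg, h]

-- ---- B-side: the fold over the cut list yields the slices between consecutive cuts ----

-- the slices B yields when starting at 'start' with remaining cut list
def slicesFrom (li : List Int) : Int → List Int → List (List Int)
  | start, [] => [PySem.List.slice li (some start) none]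
  | start, b :: bs => PySem.List.slice li (some start) (some b) :: slicesFrom li b bs

theorem foldB_slices (li : List Int) (cuts : List Int) :
    ∀ (acc : List (List Int)) (start : Int),
      (cuts.foldl (stepB li) (acc, start)).1
        ++ [PySem.List.slice li (some (cuts.foldl (stepB li) (acc, start)).2) none]
        = acc ++ slicesFrom li start cuts := by
  induction cuts with
  | nil => intro acc start; simp [slicesFrom]
  | cons b bs ih => intro acc start; simp [stepB, slicesFrom, ih]

-- the cut indices of li at positions ≥ a (cutsOf li tol = cutsFrom li tol 1)
def cutsFrom (li : List Int) (tol a : Int) : List Int :=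
  (PySem.List.pyRange a (li.length : Int) 1).filter
    (fun i => decide (PySem.List.pyGetD li i 0 - PySem.List.pyGetD li (i - 1) 0 > tol))

theorem mem_cutsFrom_le (li : List Int) (tol a b : Int) (h : b ∈ cutsFrom li tol a) : a ≤ b := by
  unfold cutsFrom at h
  exact (PySem.List.mem_pyRange_one.1 (List.mem_filter.1 h).1).1

theorem getD_append_cons {α : Type} (pre : List α) (x : α) (rest : List α) (d : α) :
    (pre ++ x :: rest).getD pre.length d = x := by
  simp [List.getD]

theorem drop_append_cons {α : Type} (pre : List α) (x : α) (rest : List α) :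
    (pre ++ x :: rest).drop pre.length = x :: rest := by
  simp

-- shifting the start of the first slice back over one known element
theorem slicesFrom_shift (li : List Int) (x : Int) (s : Nat) (r' : List Int)
    (hdrop : li.drop s = x :: r') (hdrop1 : li.drop (s + 1) = r') (cs : List Int)
    (hb : ∀ b ∈ cs, (s : Int) + 1 ≤ b) :
    slicesFrom li (s : Int) cs = mapHead (fun t => x :: t) (slicesFrom li ((s : Int) + 1) cs) := by
  cases cs with
  | nil =>
    have e1 : PySem.List.slice li (some ((s : Nat) : Int)) none = x :: r' := by
      rw [PySem.List.slice_from_natCast, hdrop]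
    have e2 : PySem.List.slice li (some ((s : Int) + 1)) none = r' := by
      rw [show ((s : Int) + 1) = ((s + 1 : Nat) : Int) by push_cast; ring,
        PySem.List.slice_from_natCast, hdrop1]
    simp [slicesFrom, mapHead, e1, e2]
  | cons b bs =>
    have hb1 : (s : Int) + 1 ≤ b := hb b (by simp)
    have hbt : b = ((b.toNat : Nat) : Int) := by omega
    have hs1 : ((s : Int) + 1) = ((s + 1 : Nat) : Int) := by push_cast; ring
    have hslice : PySem.List.slice li (some (s : Int)) (some b)
        = x :: PySem.List.slice li (some ((s : Int) + 1)) (some b) := by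
      rw [hbt, hs1, PySem.List.slice_natCast, PySem.List.slice_natCast, hdrop, hdrop1]
      have h2 : b.toNat - s = (b.toNat - (s + 1)) + 1 := by omega
      rw [h2, List.take_succ_cons]
    simp [slicesFrom, mapHead, hslice]

-- the central lemma: B's slices at the cut indices form exactly the chunks partition
theorem slices_cutsFrom (tol : Int) (r : List Int) :
    ∀ (x : Int) (pre : List Int),
      slicesFrom (pre ++ x :: r) ((pre.length : Nat) : Int)
        (cutsFrom (pre ++ x :: r) tol (((pre.length : Nat) : Int) + 1)) = chunks tol x r := by
  induction r with
  | nil =>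
    intro x pre
    have hrange : PySem.List.pyRange ((pre.length : Int) + 1) (((pre ++ [x]).length : Nat) : Int) 1
        = [] := by
      rw [PySem.List.pyRange_one]
      simp
    have hdrop : (pre ++ [x]).drop pre.length = [x] := drop_append_cons pre x []
    unfold cutsFrom
    rw [hrange, List.filter_nil]
    simp only [slicesFrom, chunks, PySem.List.slice_from_natCast, hdrop]
  | cons y r' ih =>
    intro x pre
    have hre : pre ++ x :: y :: r' = (pre ++ [x]) ++ y :: r' := by simp
    have hdropS : (pre ++ x :: y :: r').drop pre.length = x :: (y :: r') :=
      drop_append_cons pre x (y :: r')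
    have hdropS1 : (pre ++ x :: y :: r').drop (pre.length + 1) = y :: r' := by
      rw [hre]
      have := drop_append_cons (pre ++ [x]) y r'
      simpa using this
    have hlt : (pre.length : Int) + 1 < (((pre ++ x :: y :: r').length : Nat) : Int) := by
      simp
    have hgx : PySem.List.pyGetD (pre ++ x :: y :: r') ((pre.length : Int)) 0 = x := by
      rw [PySem.List.pyGetD_natCast]
      exact getD_append_cons pre x (y :: r') 0
    have hgy : PySem.List.pyGetD (pre ++ x :: y :: r') ((pre.length : Int) + 1) 0 = y := by
      have h1 : ((pre.length : Int) + 1) = (((pre ++ [x]).length : Nat) : Int) := by simp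
      rw [h1, PySem.List.pyGetD_natCast, hre]
      exact getD_append_cons (pre ++ [x]) y r' 0
    have hcuts : cutsFrom (pre ++ x :: y :: r') tol ((pre.length : Int) + 1)
        = (if y - x > tol then [(pre.length : Int) + 1] else [])
          ++ cutsFrom (pre ++ x :: y :: r') tol ((pre.length : Int) + 1 + 1) := by
      unfold cutsFrom
      rw [PySem.List.pyRange_one_cons hlt]
      have harg : (pre.length : Int) + 1 - 1 = (pre.length : Int) := by ring
      by_cases h : y - x > tol
      · simp [harg, hgx, hgy, h]
      · simp [harg, hgx, hgy, h]
    have hih := ih y (pre ++ [x])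
    have hlen1 : (((pre ++ [x]).length : Nat) : Int) = (pre.length : Int) + 1 := by simp
    rw [hlen1, ← hre] at hih
    by_cases h : y - x > tol
    · rw [hcuts, if_pos h]
      simp only [List.singleton_append, slicesFrom]
      have h1 : ((pre.length : Int) + 1) = ((pre.length + 1 : Nat) : Int) := by push_cast; ring
      have hslice : PySem.List.slice (pre ++ x :: y :: r') (some ((pre.length : Nat) : Int))
          (some ((pre.length : Int) + 1)) = [x] := by
        rw [h1, PySem.List.slice_natCast, hdropS]
        simp
      rw [hslice, hih]
      simp only [chunks]
      rw [if_pos h]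
    · rw [hcuts, if_neg h, List.nil_append]
      have hshift := slicesFrom_shift (pre ++ x :: y :: r') x pre.length (y :: r') hdropS hdropS1
        (cutsFrom (pre ++ x :: y :: r') tol ((pre.length : Int) + 1 + 1))
        (fun b hbmem => by have := mem_cutsFrom_le (pre ++ x :: y :: r') tol _ b hbmem; omega)
      rw [hshift, hih]
      simp only [chunks]
      rw [if_neg h]
      cases hc : chunks tol y r' with
      | nil => exact absurd hc (chunks_ne_nil tol y r')
      | cons g gs => simp [mapHead]

theorem group_runs_alt_cons (tol x : Int) (r : List Int) :
    group_runs_alt (x :: r) tol = chunks tol x r := by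
  have hfold := foldB_slices (x :: r) (cutsOf (x :: r) tol) [] 0
  have hmain := slices_cutsFrom tol r x []
  have hcuts : cutsOf (x :: r) tol = cutsFrom (x :: r) tol 1 := rfl
  simp only [List.nil_append, List.length_nil, Nat.cast_zero, zero_add] at hmain
  simp only [group_runs_alt]
  rw [hfold, List.nil_append, hcuts]
  exact hmain

-- ===== VERDICT (by name: the statement is the Claim_ definition above) =====
theorem group_runs_spec : Claim_unchanged_group_runs := by
  intro li tol _ hpre hnd
  unfold D_group_runs at hnd
  cases li with
  | nil => exact absurd rfl hpre
  | cons x r =>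
    rw [group_runs_cons, group_runs_alt_cons, if_neg (by omega)]
    simp

theorem group_runs_changed : Claim_changed_group_runs := by
  unfold Claim_changed_group_runs; decide

theorem group_runs_tight : Claim_exact_group_runs := by
  intro li tol _ hpre hd
  unfold D_group_runs at hd
  cases li with
  | nil => exact absurd rfl hpre
  | cons x r =>
    rw [group_runs_cons, group_runs_alt_cons, if_pos (by omega)]
    intro h
    have := congrArg List.length h
    simp at this
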